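-- pv_equiv track=rewrite | github.com/RATZogun/Trabalho_Grafos | main.py | modelar_grafo
-- ===== SOURCE A (Python) =====
-- def modelar_grafo(conteudo):
--     linhas = conteudo.splitlines()
--
--     # Identificar os nós e criar um mapeamento de índices
--     nos = {}
--     secao_nos = False
--     for linha in linhas:
--         if linha.startswith("ReN."):
--             secao_nos = True
--             continue
--         if secao_nos and linha.strip() == "":
--             secao_nos = False
--         if secao_nos:
--             partes = linha.split()
--             no = partes[0]
--             if no not in nos:
--                 nos[no] = len(nos)  # Atribuir um índice único para cada nó
--
--     # Criar uma matriz de adjacência inicializada com zeros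
--     tamanho = len(nos)
--     matriz_adjacencia = [[0] * tamanho for _ in range(tamanho)]
--     matriz_predessores = [[-1] * tamanho for _ in range(tamanho)]
--
--     # Preencher a matriz com os valores do arquivo
--     secao_arestas = False
--     secao_arcos = False
--     for linha in linhas:
--         if linha.startswith("ReE."):
--             secao_arestas = True
--             secao_arcos = False
--             continue
--         if linha.startswith("ReA."):
--             secao_arcos = True
--             secao_arestas = False
--             continue
--         if linha.strip() == "":
--             secao_arestas = False
--             secao_arcos = False
--         if secao_arestas or secao_arcos:
--             partes = linha.split()
--             de = f"N{partes[1]}"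
--             para = f"N{partes[2]}"
--             custo_transporte = int(partes[3])
--             if de in nos and para in nos:
--                 matriz_adjacencia[nos[de]][nos[para]] = custo_transporte
--                 matriz_predessores[nos[de]][nos[para]] = nos[de]
--                 if secao_arestas:
--                     matriz_adjacencia[nos[para]][nos[de]] = custo_transporte
--                     matriz_predessores[nos[para]][nos[de]] = nos[para]
--
--     return matriz_adjacencia, matriz_predessores
-- ===== SOURCE B (Python) =====
-- def modelar_grafo(conteudo):
--     # Sparse formulation: one pass records node indices and a cell dict keyed by
--     # name pairs (last write wins); matrices are materialized by comprehension,
--     # with predecessors derived from key presence instead of stored.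
--     nos = {}
--     custo = {}
--     em_no = False
--     tipo = None
--     for linha in conteudo.splitlines():
--         branco = linha.strip() == ""
--         if linha.startswith("ReN."):
--             em_no = True
--         else:
--             em_no = em_no and not branco
--             if em_no:
--                 nos.setdefault(linha.split()[0], len(nos))
--         if linha.startswith("ReE."):
--             tipo = "E"
--         elif linha.startswith("ReA."):
--             tipo = "A"
--         else:
--             if branco:
--                 tipo = None
--             if tipo:
--                 p = linha.split()
--                 c = int(p[3])
--                 custo[(f"N{p[1]}", f"N{p[2]}")] = c
--                 if tipo == "E":
--                     custo[(f"N{p[2]}", f"N{p[1]}")] = c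
--     ordem = list(nos)
--     adj = [[custo.get((u, v), 0) for v in ordem] for u in ordem]
--     pred = [[i if (u, v) in custo else -1 for v in ordem] for i, u in enumerate(ordem)]
--     return adj, pred
-- ===== Notes on version B (the rewrite author's own statement) =====
-- stated objective: alternative
-- what changed: B drops A's mutable VxV matrices filled by a second scan over the lines: one pass collects node indices and a sparse dict of matrix cells keyed by node-name pairs (last write wins); both matrices are then materialized by comprehensions, the predecessor matrix derived from key presence instead of stored values.
import Mathlib
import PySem

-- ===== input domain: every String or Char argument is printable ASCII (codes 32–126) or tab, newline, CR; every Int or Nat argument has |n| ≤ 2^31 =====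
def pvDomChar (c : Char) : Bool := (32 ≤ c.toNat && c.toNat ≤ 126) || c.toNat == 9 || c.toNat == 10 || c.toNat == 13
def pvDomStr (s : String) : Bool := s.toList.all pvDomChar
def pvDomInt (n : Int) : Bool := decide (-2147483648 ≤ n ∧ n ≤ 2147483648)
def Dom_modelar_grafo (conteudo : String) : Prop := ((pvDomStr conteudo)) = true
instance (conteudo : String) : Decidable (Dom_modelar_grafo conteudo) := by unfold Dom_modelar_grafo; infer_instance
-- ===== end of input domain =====

-- B replaces A's mutable V×V matrices filled by a second scan with a sparse cell dict keyed by
-- node-name pairs built in one pass, then materializes both matrices by comprehensions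
-- (objective: alternative formulation; return value only).

-- matrix[i][j] = v  (Python list assignment on an inner row)
def pvSet2 (m : List (List Int)) (i j v : Int) : List (List Int) :=
  PySem.List.pySetD m i (PySem.List.pySetD (PySem.List.pyGetD m i []) j v)

-- ===== PORT A =====
-- first loop of A: (secao_nos, nos) updated per line
def pvA_passoNos (st : Bool × PySem.Dict String Int) (linha : String) :
    Bool × PySem.Dict String Int :=
  if PySem.Str.startswith linha "ReN." then (true, st.2)
  else
    let sn := st.1 && !(PySem.Str.strip linha == "")
    if sn then
      let no := PySem.List.pyGetD (PySem.Str.split₀ linha) 0 ""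
      if st.2.contains no then (sn, st.2) else (sn, st.2.insert no (st.2.size : Int))
    else (sn, st.2)

-- second loop of A: (secao_arestas, secao_arcos, (matriz_adjacencia, matriz_predessores))
def pvA_passoArestas (nos : PySem.Dict String Int)
    (st : Bool × Bool × (List (List Int) × List (List Int))) (linha : String) :
    Bool × Bool × (List (List Int) × List (List Int)) :=
  if PySem.Str.startswith linha "ReE." then (true, false, st.2.2)
  else if PySem.Str.startswith linha "ReA." then (false, true, st.2.2)
  else
    let sa := st.1 && !(PySem.Str.strip linha == "")
    let sc := st.2.1 && !(PySem.Str.strip linha == "")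
    if sa || sc then
      let partes := PySem.Str.split₀ linha
      let de := "N" ++ PySem.List.pyGetD partes 1 ""
      let para := "N" ++ PySem.List.pyGetD partes 2 ""
      let custo := (PySem.Int.ofStr? (PySem.List.pyGetD partes 3 "")).getD 0  -- int(partes[3]); Pre_ excludes the ValueError case
      if nos.contains de && nos.contains para then
        let i := nos.getD de 0
        let j := nos.getD para 0
        if sa then
          (sa, sc, pvSet2 (pvSet2 st.2.2.1 i j custo) j i custo,
                   pvSet2 (pvSet2 st.2.2.2 i j i) j i j)
        else (sa, sc, pvSet2 st.2.2.1 i j custo, pvSet2 st.2.2.2 i j i)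
      else (sa, sc, st.2.2)
    else (sa, sc, st.2.2)

def modelar_grafo (conteudo : String) : List (List Int) × List (List Int) :=
  let linhas := PySem.Str.splitlines conteudo
  let nos := (linhas.foldl pvA_passoNos (false, PySem.Dict.empty)).2
  let tamanho : Int := (nos.size : Int)
  let madj := (PySem.List.pyRange 0 tamanho 1).map (fun _ => PySem.List.pyRepeat [(0 : Int)] tamanho)
  let mpred := (PySem.List.pyRange 0 tamanho 1).map (fun _ => PySem.List.pyRepeat [(-1 : Int)] tamanho)
  (linhas.foldl (pvA_passoArestas nos) (false, false, (madj, mpred))).2.2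

-- ===== PORT B =====
-- node half of B's per-line update: em_no flag and nos dict (setdefault)
def pvB_no (st : Bool × PySem.Dict String Int) (linha : String) :
    Bool × PySem.Dict String Int :=
  if PySem.Str.startswith linha "ReN." then (true, st.2)
  else
    let en := st.1 && !(PySem.Str.strip linha == "")
    if en then
      (en, st.2.setdefault (PySem.List.pyGetD (PySem.Str.split₀ linha) 0 "") (st.2.size : Int))
    else (en, st.2)

-- cell half of B's per-line update: tipo (none / some true = "E" / some false = "A") and the
-- sparse cell dict custo keyed by ("N"+u, "N"+v) name pairs, last write wins
def pvB_custo (st : Option Bool × PySem.Dict (String × String) Int) (linha : String) :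
    Option Bool × PySem.Dict (String × String) Int :=
  if PySem.Str.startswith linha "ReE." then (some true, st.2)
  else if PySem.Str.startswith linha "ReA." then (some false, st.2)
  else
    let tp := if PySem.Str.strip linha == "" then none else st.1
    match tp with
    | none => (none, st.2)
    | some e =>
      let p := PySem.Str.split₀ linha
      let c := (PySem.Int.ofStr? (PySem.List.pyGetD p 3 "")).getD 0  -- int(p[3]); Pre_ excludes the ValueError case
      let d1 := st.2.insert ("N" ++ PySem.List.pyGetD p 1 "", "N" ++ PySem.List.pyGetD p 2 "") c
      (some e,
        if e then d1.insert ("N" ++ PySem.List.pyGetD p 2 "", "N" ++ PySem.List.pyGetD p 1 "") c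
        else d1)

def modelar_grafo_alt (conteudo : String) : List (List Int) × List (List Int) :=
  let r := (PySem.Str.splitlines conteudo).foldl
      (fun st linha => (pvB_no st.1 linha, pvB_custo st.2 linha))
      ((false, PySem.Dict.empty), (none, PySem.Dict.empty))
  let ordem := r.1.2.keys
  let custo := r.2.2
  (ordem.map (fun u => ordem.map (fun v => custo.getD (u, v) 0)),
   (PySem.List.enumerate ordem).map
     (fun p => ordem.map (fun v => if custo.contains (p.2, v) then p.1 else (-1 : Int))))

-- ===== PRECONDITION & SPEC =====
-- Pre_ excludes exactly the inputs where Python A raises: a line read while an edge/arc section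
-- is active must have at least 4 whitespace tokens with an int-parsable fourth (else IndexError/ValueError).
def pvPreOk : List String → Bool → Bool → Bool
  | [], _, _ => true
  | l :: tl, sa, sc =>
    if PySem.Str.startswith l "ReE." then pvPreOk tl true false
    else if PySem.Str.startswith l "ReA." then pvPreOk tl false true
    else
      let sa' := sa && !(PySem.Str.strip l == "")
      let sc' := sc && !(PySem.Str.strip l == "")
      if sa' || sc' then
        (decide (4 ≤ (PySem.Str.split₀ l).length)
          && (PySem.Int.ofStr? (PySem.List.pyGetD (PySem.Str.split₀ l) 3 "")).isSome)
          && pvPreOk tl sa' sc'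
      else pvPreOk tl sa' sc'

def Pre_modelar_grafo (conteudo : String) : Prop :=
  pvPreOk (PySem.Str.splitlines conteudo) false false = true

instance (conteudo : String) : Decidable (Pre_modelar_grafo conteudo) := by
  unfold Pre_modelar_grafo; infer_instance

def pvWitness_modelar_grafo : String :=
  "ReN.\nN1 1\nN2 1\nN3 2\n\nReE.\nE1 1 2 5\nE2 2 3 7\n\nReA.\nA1 3 1 4"

def Spec_modelar_grafo (conteudo : String) (out : List (List Int) × List (List Int)) : Prop :=
  out = modelar_grafo_alt conteudo
instance (conteudo : String) (out : List (List Int) × List (List Int)) :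
    Decidable (Spec_modelar_grafo conteudo out) := by unfold Spec_modelar_grafo; infer_instance

-- ===== CLAIM (what is proved, stated in full; the proofs are below) =====
def Claim_equal_modelar_grafo : Prop := ∀ (conteudo : String), Dom_modelar_grafo conteudo →
  Pre_modelar_grafo conteudo → Spec_modelar_grafo conteudo (modelar_grafo conteudo)

-- ===== LEMMAS AND PROOFS =====

-- B's node half is per-line the same update as A's first loop (setdefault unfolded)
theorem pvB_no_eq : pvB_no = pvA_passoNos := by
  funext st linha
  simp only [pvB_no, pvA_passoNos]
  split_ifs with h1 h2 hc
  · rfl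
  · rw [PySem.Dict.setdefault_of_contains st.2 _ hc]
  · rw [PySem.Dict.setdefault_of_not_contains st.2 _ (by simpa using hc)]
  · rfl

-- the node-index dict invariant: distinct keys, and the value stored at the i-th key is i
def pvNosInv (nos : PySem.Dict String Int) : Prop :=
  nos.keys.Nodup ∧ ∀ (i : Nat) (h : i < nos.keys.length), nos.getD nos.keys[i] 0 = (i : Int)

theorem pvSize_eq (nos : PySem.Dict String Int) : nos.size = nos.keys.length := by
  simp [PySem.Dict.size, PySem.Dict.keys]

theorem pvNosInv_insert (nos : PySem.Dict String Int) (k : String)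
    (hc : nos.contains k = false) (h : pvNosInv nos) :
    pvNosInv (nos.insert k (nos.size : Int)) := by
  obtain ⟨hnd, hval⟩ := h
  have hkeys : (nos.insert k (nos.size : Int)).keys = nos.keys ++ [k] :=
    PySem.Dict.keys_insert_of_not_contains nos _ hc
  have hkne : k ∉ nos.keys := by
    intro hm
    rw [← PySem.Dict.contains_iff_mem_keys] at hm
    rw [hc] at hm; exact Bool.false_ne_true hm
  constructor
  · rw [hkeys]
    exact hnd.append (List.nodup_singleton k)
      (by simpa [List.disjoint_singleton] using hkne)
  · intro i hi
    rw [hkeys] at hi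
    simp only [List.length_append, List.length_singleton] at hi
    by_cases hlt : i < nos.keys.length
    · have hel : (nos.keys ++ [k])[i]'(by simpa using hi) = nos.keys[i] :=
        List.getElem_append_left hlt
      simp only [hkeys, hel]
      rw [PySem.Dict.getD_insert]
      rw [if_neg (fun (he : nos.keys[i] = k) => hkne (he ▸ List.getElem_mem hlt))]
      exact hval i hlt
    · have hieq : i = nos.keys.length := by omega
      have hel : (nos.keys ++ [k])[i]'(by simpa using hi) = k := by
        rw [List.getElem_append_right (by omega)]
        simp [hieq]
      simp only [hkeys, hel]
      rw [PySem.Dict.getD_insert, if_pos rfl, pvSize_eq, hieq]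

theorem pvNosInv_fold (ls : List String) :
    ∀ (b : Bool) (nos : PySem.Dict String Int), pvNosInv nos →
      pvNosInv ((ls.foldl pvA_passoNos (b, nos)).2) := by
  induction ls with
  | nil => intro b nos h; exact h
  | cons l tl ih =>
    intro b nos h
    simp only [List.foldl_cons]
    simp only [pvA_passoNos]
    split_ifs with h1 h2 hc
    · exact ih _ _ h
    · exact ih _ _ h
    · exact ih _ _ (pvNosInv_insert _ _ (by simpa using hc) h)
    · exact ih _ _ h

theorem pvNosInv_empty : pvNosInv (PySem.Dict.empty : PySem.Dict String Int) := by
  constructor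
  · simp [PySem.Dict.keys, PySem.Dict.empty]
  · intro i h; simp [PySem.Dict.keys, PySem.Dict.empty] at h

-- materializations of a cell dict over the node order
def pvMatA (nos : PySem.Dict String Int) (d : PySem.Dict (String × String) Int) : List (List Int) :=
  nos.keys.map (fun u => nos.keys.map (fun v => d.getD (u, v) 0))

def pvMatP (nos : PySem.Dict String Int) (d : PySem.Dict (String × String) Int) : List (List Int) :=
  (PySem.List.enumerate nos.keys).map
    (fun p => nos.keys.map (fun v => if d.contains (p.2, v) then p.1 else (-1 : Int)))

-- A's initial zero / minus-one matrices are the materializations of the empty dict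
theorem pvMatA_empty (nos : PySem.Dict String Int) :
    (PySem.List.pyRange 0 (nos.size : Int) 1).map (fun _ => PySem.List.pyRepeat [(0 : Int)] (nos.size : Int))
      = pvMatA nos PySem.Dict.empty := by
  have hn : nos.size = nos.keys.length := pvSize_eq nos
  simp only [pvMatA, PySem.Dict.getD_empty, hn, PySem.List.pyRange_zero_natCast,
    PySem.List.pyRepeat_singleton, List.map_map, Int.toNat_natCast]
  simp [Function.comp_def, List.map_const']

theorem pvMatP_empty (nos : PySem.Dict String Int) :
    (PySem.List.pyRange 0 (nos.size : Int) 1).map (fun _ => PySem.List.pyRepeat [(-1 : Int)] (nos.size : Int))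
      = pvMatP nos PySem.Dict.empty := by
  have hn : nos.size = nos.keys.length := pvSize_eq nos
  simp only [pvMatP, PySem.Dict.contains_empty, hn, PySem.List.pyRange_zero_natCast,
    PySem.List.pyRepeat_singleton, List.map_map, Int.toNat_natCast, Bool.false_eq_true,
    if_false]
  simp [Function.comp_def, List.map_const', PySem.List.length_enumerate]

-- an in-place matrix write is an insert into the cell dict (both node names present)
theorem pvSet2_matA (nos : PySem.Dict String Int) (d : PySem.Dict (String × String) Int)
    (hinv : pvNosInv nos) (de para : String) (c : Int)
    (hde : de ∈ nos.keys) (hpara : para ∈ nos.keys) :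
    pvSet2 (pvMatA nos d) (nos.getD de 0) (nos.getD para 0) c
      = pvMatA nos (d.insert (de, para) c) := by
  obtain ⟨hnd, hval⟩ := hinv
  obtain ⟨iN, hiN, hdeq⟩ := List.mem_iff_getElem.mp hde
  obtain ⟨jN, hjN, hpeq⟩ := List.mem_iff_getElem.mp hpara
  have hi : nos.getD de 0 = (iN : Int) := by rw [← hdeq]; exact hval iN hiN
  have hj : nos.getD para 0 = (jN : Int) := by rw [← hpeq]; exact hval jN hjN
  unfold pvSet2 pvMatA
  rw [hi, hj, PySem.List.pySetD_natCast, PySem.List.pyGetD_natCast, PySem.List.pySetD_natCast]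
  have hget : (nos.keys.map (fun u => nos.keys.map (fun v => d.getD (u, v) 0))).getD iN []
      = nos.keys.map (fun v => d.getD (de, v) 0) := by
    rw [List.getD_eq_getElem _ _ (by simpa using hiN), List.getElem_map, hdeq]
  rw [hget]
  apply List.ext_getElem
  · simp
  · intro k hk1 hk2
    simp only [List.length_set, List.length_map] at hk1 hk2
    rw [List.getElem_set, List.getElem_map]
    by_cases hki : iN = k
    · subst hki
      rw [if_pos rfl]
      simp only [List.getElem_map, hdeq]
      apply List.ext_getElem
      · simp
      · intro m hm1 hm2
        simp only [List.length_set, List.length_map] at hm1 hm2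
        simp only [List.getElem_set, List.getElem_map, PySem.Dict.getD_insert]
        by_cases hjm : jN = m
        · subst hjm
          rw [if_pos rfl, if_pos (by rw [hpeq])]
        · rw [if_neg hjm]
          rw [if_neg (fun (he : (de, nos.keys[m]) = (de, para)) => hjm
            (((hnd.getElem_inj_iff).mp (by rw [hpeq]; exact congrArg Prod.snd he)).symm))]
    · rw [if_neg hki]
      simp only [List.getElem_map]
      refine List.map_congr_left (fun v hv => ?_)
      rw [PySem.Dict.getD_insert]
      rw [if_neg (fun (he : (nos.keys[k], v) = (de, para)) => hki
        ((hnd.getElem_inj_iff).mp (by rw [hdeq]; exact congrArg Prod.fst he)).symm)]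

theorem pvSet2_matP (nos : PySem.Dict String Int) (d : PySem.Dict (String × String) Int)
    (hinv : pvNosInv nos) (de para : String) (c : Int)
    (hde : de ∈ nos.keys) (hpara : para ∈ nos.keys) :
    pvSet2 (pvMatP nos d) (nos.getD de 0) (nos.getD para 0) (nos.getD de 0)
      = pvMatP nos (d.insert (de, para) c) := by
  obtain ⟨hnd, hval⟩ := hinv
  obtain ⟨iN, hiN, hdeq⟩ := List.mem_iff_getElem.mp hde
  obtain ⟨jN, hjN, hpeq⟩ := List.mem_iff_getElem.mp hpara
  have hi : nos.getD de 0 = (iN : Int) := by rw [← hdeq]; exact hval iN hiN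
  have hj : nos.getD para 0 = (jN : Int) := by rw [← hpeq]; exact hval jN hjN
  unfold pvSet2 pvMatP
  rw [hi, hj, PySem.List.pySetD_natCast, PySem.List.pyGetD_natCast, PySem.List.pySetD_natCast]
  have hlen : iN < (PySem.List.enumerate nos.keys 0).length := by
    rw [PySem.List.length_enumerate]; exact hiN
  have hget : ((PySem.List.enumerate nos.keys 0).map
        (fun p => nos.keys.map (fun v => if d.contains (p.2, v) = true then p.1 else (-1 : Int)))).getD iN []
      = nos.keys.map (fun v => if d.contains (de, v) = true then (iN : Int) else (-1 : Int)) := by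
    rw [List.getD_eq_getElem _ _ (by simpa using hlen), List.getElem_map,
      PySem.List.getElem_enumerate]
    simp [hdeq]
  rw [hget]
  apply List.ext_getElem
  · simp
  · intro k hk1 hk2
    simp only [List.length_set, List.length_map, PySem.List.length_enumerate] at hk1 hk2
    simp only [List.getElem_set, List.getElem_map, PySem.List.getElem_enumerate]
    by_cases hki : iN = k
    · subst hki
      rw [if_pos rfl]
      apply List.ext_getElem
      · simp
      · intro m hm1 hm2
        simp only [List.length_set, List.length_map] at hm1 hm2
        simp only [List.getElem_set, List.getElem_map, PySem.Dict.contains_insert, hdeq, zero_add]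
        by_cases hjm : jN = m
        · subst hjm
          rw [if_pos rfl, if_pos (by simp [hpeq])]
        · rw [if_neg hjm]
          have hne : ((de, nos.keys[m]) == (de, para)) = false := by
            simp only [beq_eq_false_iff_ne, ne_eq]
            intro he
            exact hjm (((hnd.getElem_inj_iff).mp (by rw [hpeq]; exact congrArg Prod.snd he)).symm)
          rw [hne, Bool.false_or]
    · rw [if_neg hki]
      simp only [zero_add]
      refine List.map_congr_left (fun v hv => ?_)
      rw [PySem.Dict.contains_insert]
      have hne : ((nos.keys[k], v) == (de, para)) = false := by
        simp only [beq_eq_false_iff_ne, ne_eq]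
        intro he
        exact hki ((hnd.getElem_inj_iff).mp (by rw [hdeq]; exact congrArg Prod.fst he)).symm
      rw [hne, Bool.false_or]

-- inserting a cell whose names are not both mapped leaves the materializations unchanged
theorem pvMatA_insert_out (nos : PySem.Dict String Int) (d : PySem.Dict (String × String) Int)
    (de para : String) (c : Int) (h : ¬(de ∈ nos.keys ∧ para ∈ nos.keys)) :
    pvMatA nos (d.insert (de, para) c) = pvMatA nos d := by
  unfold pvMatA
  refine List.map_congr_left (fun u hu => List.map_congr_left (fun v hv => ?_))
  rw [PySem.Dict.getD_insert]
  rw [if_neg (fun he => h (by cases he; exact ⟨hu, hv⟩))]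

theorem pvMatP_insert_out (nos : PySem.Dict String Int) (d : PySem.Dict (String × String) Int)
    (de para : String) (c : Int) (h : ¬(de ∈ nos.keys ∧ para ∈ nos.keys)) :
    pvMatP nos (d.insert (de, para) c) = pvMatP nos d := by
  unfold pvMatP
  refine List.map_congr_left (fun p hp => List.map_congr_left (fun v hv => ?_))
  have hp2 : p.2 ∈ nos.keys := by
    rw [PySem.List.mem_enumerate_iff] at hp
    obtain ⟨k, hk, rfl⟩ := hp
    exact List.getElem_mem hk
  rw [PySem.Dict.contains_insert]
  have : ((p.2, v) == (de, para)) = false := by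
    simp only [beq_eq_false_iff_ne, ne_eq]
    intro he; cases he; exact h ⟨hp2, hv⟩
  rw [this, Bool.false_or]

-- one line of A's second loop is one line of B's cell fold, through the materializations
theorem pvStep_eq (nos : PySem.Dict String Int) (hinv : pvNosInv nos) (l : String)
    (t : Option Bool) (d : PySem.Dict (String × String) Int) :
    pvA_passoArestas nos (t == some true, t == some false, (pvMatA nos d, pvMatP nos d)) l
      = ((pvB_custo (t, d) l).1 == some true, (pvB_custo (t, d) l).1 == some false,
         (pvMatA nos (pvB_custo (t, d) l).2, pvMatP nos (pvB_custo (t, d) l).2)) := by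
  simp only [pvA_passoArestas, pvB_custo]
  by_cases h1 : PySem.Str.startswith l "ReE." = true
  · simp at h1
    simp [h1]
  · simp at h1
    by_cases h2 : PySem.Str.startswith l "ReA." = true
    · simp at h2
      simp [h1, h2]
    · simp at h2
      by_cases hb : PySem.Str.strip l = ""
      · simp [h1, h2, hb]
      · cases t with
        | none => simp [h1, h2, hb]
        | some e =>
          by_cases hc : nos.contains ("N" ++ PySem.List.pyGetD (PySem.Str.split₀ l) 1 "") = true
              ∧ nos.contains ("N" ++ PySem.List.pyGetD (PySem.Str.split₀ l) 2 "") = true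
          · have hde : ("N" ++ PySem.List.pyGetD (PySem.Str.split₀ l) 1 "") ∈ nos.keys :=
              (PySem.Dict.contains_iff_mem_keys _ _).mp hc.1
            have hpara : ("N" ++ PySem.List.pyGetD (PySem.Str.split₀ l) 2 "") ∈ nos.keys :=
              (PySem.Dict.contains_iff_mem_keys _ _).mp hc.2
            cases e with
            | true =>
              simp [h1, h2, hb, hc,
                pvSet2_matA nos d hinv _ _ _ hde hpara,
                pvSet2_matA nos _ hinv _ _ _ hpara hde,
                pvSet2_matP nos d hinv _ _
                  ((PySem.Int.ofStr? (PySem.List.pyGetD (PySem.Str.split₀ l) 3 "")).getD 0) hde hpara,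
                pvSet2_matP nos _ hinv _ _
                  ((PySem.Int.ofStr? (PySem.List.pyGetD (PySem.Str.split₀ l) 3 "")).getD 0) hpara hde]
            | false =>
              simp [h1, h2, hb, hc,
                pvSet2_matA nos d hinv _ _ _ hde hpara,
                pvSet2_matP nos d hinv _ _
                  ((PySem.Int.ofStr? (PySem.List.pyGetD (PySem.Str.split₀ l) 3 "")).getD 0) hde hpara]
          · have hout : ¬(("N" ++ PySem.List.pyGetD (PySem.Str.split₀ l) 1 "") ∈ nos.keys
                ∧ ("N" ++ PySem.List.pyGetD (PySem.Str.split₀ l) 2 "") ∈ nos.keys) := by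
              intro ⟨ha, hb2⟩
              exact hc ⟨(PySem.Dict.contains_iff_mem_keys _ _).mpr ha,
                        (PySem.Dict.contains_iff_mem_keys _ _).mpr hb2⟩
            have hout2 : ¬(("N" ++ PySem.List.pyGetD (PySem.Str.split₀ l) 2 "") ∈ nos.keys
                ∧ ("N" ++ PySem.List.pyGetD (PySem.Str.split₀ l) 1 "") ∈ nos.keys) :=
              fun ⟨x, y⟩ => hout ⟨y, x⟩
            cases e with
            | true =>
              simp [h1, h2, hb, hc, pvMatA_insert_out _ _ _ _ _ hout,
                pvMatA_insert_out _ _ _ _ _ hout2,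
                pvMatP_insert_out _ _ _ _ _ hout, pvMatP_insert_out _ _ _ _ _ hout2]
            | false =>
              simp [h1, h2, hb, hc, pvMatA_insert_out _ _ _ _ _ hout,
                pvMatP_insert_out _ _ _ _ _ hout]

-- A's second loop is B's cell fold followed by materialization
theorem pvLoop2_eq (nos : PySem.Dict String Int) (hinv : pvNosInv nos) (ls : List String) :
    ∀ (t : Option Bool) (d : PySem.Dict (String × String) Int),
    ls.foldl (pvA_passoArestas nos) (t == some true, t == some false, (pvMatA nos d, pvMatP nos d))
      = ((ls.foldl pvB_custo (t, d)).1 == some true,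
         (ls.foldl pvB_custo (t, d)).1 == some false,
         (pvMatA nos (ls.foldl pvB_custo (t, d)).2, pvMatP nos (ls.foldl pvB_custo (t, d)).2)) := by
  induction ls with
  | nil => intro t d; rfl
  | cons l tl ih =>
    intro t d
    simp only [List.foldl_cons]
    rw [pvStep_eq nos hinv l t d]
    exact ih (pvB_custo (t, d) l).1 (pvB_custo (t, d) l).2

-- ===== VERDICT (by name: the statement is the Claim_ definition above) =====
theorem modelar_grafo_spec : Claim_equal_modelar_grafo := by
  intro c _ _
  show modelar_grafo c = modelar_grafo_alt c
  simp only [modelar_grafo, modelar_grafo_alt]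
  rw [show (fun (st : (Bool × PySem.Dict String Int) × (Option Bool × PySem.Dict (String × String) Int)) linha =>
        (pvB_no st.1 linha, pvB_custo st.2 linha))
      = (fun st linha => (pvA_passoNos st.1 linha, pvB_custo st.2 linha)) by rw [pvB_no_eq]]
  rw [PySem.List.foldl_prod_mk pvA_passoNos pvB_custo]
  have hinv := pvNosInv_fold (PySem.Str.splitlines c) false PySem.Dict.empty pvNosInv_empty
  rw [pvMatA_empty, pvMatP_empty]
  rw [show (false, false, (pvMatA ((PySem.Str.splitlines c).foldl pvA_passoNos (false, PySem.Dict.empty)).2 PySem.Dict.empty,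
        pvMatP ((PySem.Str.splitlines c).foldl pvA_passoNos (false, PySem.Dict.empty)).2 PySem.Dict.empty))
      = ((none : Option Bool) == some true, (none : Option Bool) == some false,
        (pvMatA ((PySem.Str.splitlines c).foldl pvA_passoNos (false, PySem.Dict.empty)).2 PySem.Dict.empty,
         pvMatP ((PySem.Str.splitlines c).foldl pvA_passoNos (false, PySem.Dict.empty)).2 PySem.Dict.empty)) from rfl]
  rw [pvLoop2_eq _ hinv]
  rfl
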